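-- pv_equiv track=rewrite | github.com/vesakoo/FmiWeatherStationESP32S3 | tools/pngsymbolsToC.py | join_with_limit
-- ===== SOURCE A (Python) =====
-- def join_with_limit(arr, limit):
--     result = ''
--     count = 0
--
--     for item in arr:
--         result += str(item) + ', '
--         count += 1
--
--         if count == limit:
--             result += '\n  '
--             count = 0
--
--     return result.rstrip(', ')
-- ===== SOURCE B (Python) =====
-- def _chunks(items, limit):
--     # split into consecutive blocks of `limit` items; one single block when limit <= 0
--     if limit <= 0:
--         return [items] if items else []
--     chunks = []
--     i = 0
--     while i < len(items):
--         chunks.append(items[i:i + limit])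
--         i += limit
--     return chunks
--
--
-- def join_with_limit(arr, limit):
--     items = [str(x) for x in arr]
--     out = []
--     for c in _chunks(items, limit):
--         seg = ', '.join(c) + ', '
--         if limit > 0 and len(c) == limit:
--             seg += '\n  '
--         out.append(seg)
--     return ''.join(out).rstrip(', ')
-- ===== Notes on version B (the rewrite author's own statement) =====
-- stated objective: alternative
-- what changed: Replaced the counter-driven single accumulating loop by a group-then-join decomposition: the items are split into chunks of `limit` (one chunk when limit<=0), each chunk is rendered with ', '.join plus an optional newline for full chunks, and the segments are concatenated before the same final rstrip(', ').
import Mathlib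
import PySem

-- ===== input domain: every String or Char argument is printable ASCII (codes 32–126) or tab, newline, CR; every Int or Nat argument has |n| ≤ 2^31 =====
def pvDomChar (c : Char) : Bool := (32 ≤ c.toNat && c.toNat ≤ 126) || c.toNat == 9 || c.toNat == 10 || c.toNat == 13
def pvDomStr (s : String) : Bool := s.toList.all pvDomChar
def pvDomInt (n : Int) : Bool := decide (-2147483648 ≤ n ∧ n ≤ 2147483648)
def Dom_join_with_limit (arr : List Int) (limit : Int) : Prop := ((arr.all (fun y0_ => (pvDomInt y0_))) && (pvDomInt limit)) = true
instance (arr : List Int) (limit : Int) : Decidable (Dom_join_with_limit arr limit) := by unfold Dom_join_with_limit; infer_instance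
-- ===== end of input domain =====

-- B replaces A's counter-driven accumulating loop by a group-then-join decomposition
-- (chunk the stringified items, render each chunk with ', '.join); alternative, not faster.

-- hand port of Python's `s.rstrip(', ')` (drop trailing characters from the set {',', ' '});
-- exact: Python removes the longest trailing run of characters of the set. Used by both ports
-- (both Pythons end with the same `.rstrip(', ')` call).
def pvRstripCommaSpace (cs : List Char) : List Char :=
  (cs.reverse.dropWhile (fun c => c == ',' || c == ' ')).reverse

-- ===== PORT A =====
def join_with_limit (arr : List Int) (limit : Int) : String :=
  -- Python builds `result` as a str; ported on List Char (String.mk at the end) so the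
  -- kernel can compute with it; structure (single fold, counter reset on limit) is A's.
  let st := arr.foldl (fun (st : List Char × Int) item =>
      let result := st.1 ++ (PySem.Int.toStr item).toList ++ [',', ' ']
      let count := st.2 + 1
      if count = limit then (result ++ ['\n', ' ', ' '], 0) else (result, count))
    ([], 0)
  String.mk (pvRstripCommaSpace st.1)

-- ===== PORT B =====
-- port of Source B's `_chunks` while loop: the loop variable `i` advances by `limit`;
-- the loop becomes recursion on `i` (decreasing measure: items remaining past `i`)
def pvChunksGo {α : Type} (limit : Int) (hl : 0 < limit) (items : List α) (i : Int) :
    List (List α) :=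
  if h : i < (items.length : Int) then
    PySem.List.slice items (some i) (some (i + limit)) :: pvChunksGo limit hl items (i + limit)
  else []
termination_by ((items.length : Int) - i).toNat
decreasing_by omega

def pvChunks {α : Type} (limit : Int) (items : List α) : List (List α) :=
  if h : limit ≤ 0 then (if items = [] then [] else [items])
  else pvChunksGo limit (by omega) items 0

def join_with_limit_alt (arr : List Int) (limit : Int) : String :=
  let items := arr.map (fun x => (PySem.Int.toStr x).toList)
  let segs := (pvChunks limit items).map (fun c =>
      let seg := PySem.Chars.join [',', ' '] c ++ [',', ' ']
      if 0 < limit ∧ (c.length : Int) = limit then seg ++ ['\n', ' ', ' '] else seg)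
  String.mk (pvRstripCommaSpace segs.flatten)

-- ===== PRECONDITION & SPEC =====
def Spec_join_with_limit (arr : List Int) (limit : Int) (out : String) : Prop := out = join_with_limit_alt arr limit
instance (arr : List Int) (limit : Int) (out : String) : Decidable (Spec_join_with_limit arr limit out) := by unfold Spec_join_with_limit; infer_instance

-- ===== CLAIM (what is proved, stated in full; the proofs are below) =====
def Claim_equal_join_with_limit : Prop := ∀ (arr : List Int) (limit : Int), Dom_join_with_limit arr limit → Spec_join_with_limit arr limit (join_with_limit arr limit)

-- ===== LEMMAS AND PROOFS =====

-- proof-side recursive characterisation of Source B's chunking (blocks peeled off the front)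
def pvChunksRec {α : Type} (limit : Int) (items : List α) : List (List α) :=
  if limit ≤ 0 then (if items = [] then [] else [items])
  else if h : (items.length : Int) ≤ limit then (if items = [] then [] else [items])
  else items.take limit.toNat :: pvChunksRec limit (items.drop limit.toNat)
termination_by items.length
decreasing_by simp; omega


-- A's loop body, abstracted over the already-stringified item
def pvStep (limit : Int) (st : List Char × Int) (s : List Char) : List Char × Int :=
  let result := st.1 ++ s ++ [',', ' ']
  let count := st.2 + 1
  if count = limit then (result ++ ['\n', ' ', ' '], 0) else (result, count)

-- the raw concatenation "s₁, s₂, … sₙ, " of a block of items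
def pvCat (xs : List (List Char)) : List Char :=
  (xs.map (fun s => s ++ [',', ' '])).flatten

theorem pvCat_eq_join (xs : List (List Char)) (hne : xs ≠ []) :
    pvCat xs = PySem.Chars.join [',', ' '] xs ++ [',', ' '] := by
  induction xs with
  | nil => simp at hne
  | cons a t ih =>
    cases t with
    | nil => simp [pvCat, PySem.Chars.join_singleton]
    | cons b u =>
      rw [PySem.Chars.join_cons_cons]
      have := ih (by simp)
      simp only [pvCat, List.map_cons, List.flatten_cons] at this ⊢
      rw [this]
      simp

-- folding a block that never fills the counter
theorem pvFold_no_trigger (limit : Int) (xs : List (List Char)) (r : List Char) (c : Int)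
    (hc : 0 ≤ c) (h : limit ≤ 0 ∨ c + xs.length < limit) :
    xs.foldl (pvStep limit) (r, c) = (r ++ pvCat xs, c + xs.length) := by
  induction xs generalizing r c with
  | nil => simp [pvCat]
  | cons a t ih =>
    have hne : c + 1 ≠ limit := by
      rcases h with h | h
      · omega
      · simp only [List.length_cons] at h; push_cast at h; omega
    have h' : limit ≤ 0 ∨ c + 1 + (t.length : Int) < limit := by
      rcases h with h | h
      · exact Or.inl h
      · right; simp only [List.length_cons] at h; push_cast at h ⊢; omega
    have := ih (r ++ a ++ [',', ' ']) (c + 1) (by omega) h'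
    simp only [List.foldl_cons, pvStep, if_neg hne, this, pvCat, List.map_cons, List.flatten_cons]
    rw [Prod.mk.injEq]
    refine ⟨by simp, by simp; push_cast; omega⟩

-- folding a full block from counter 0: one newline is appended and the counter resets
theorem pvFold_full (limit : Int) (hpos : 0 < limit) (xs : List (List Char)) (r : List Char)
    (hlen : (xs.length : Int) = limit) :
    xs.foldl (pvStep limit) (r, 0) = (r ++ pvCat xs ++ ['\n', ' ', ' '], 0) := by
  rcases List.eq_nil_or_concat xs with h | ⟨ys, z, rfl⟩
  · subst h; simp at hlen; omega
  · have hys : (ys.length : Int) + 1 = limit := by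
      have h2 := hlen; simp at h2; omega
    rw [List.concat_eq_append, List.foldl_append]
    rw [pvFold_no_trigger limit ys r 0 le_rfl (by right; omega)]
    simp only [List.foldl_cons, List.foldl_nil, pvStep]
    rw [if_pos (show (0 : Int) + ys.length + 1 = limit by omega)]
    simp [pvCat]

-- main invariant: A's fold from counter 0 produces exactly B's concatenated segments
theorem pvFold_eq_chunks (limit : Int) (items : List (List Char)) (r : List Char) :
    (items.foldl (pvStep limit) (r, 0)).1 =
      r ++ ((pvChunksRec limit items).map (fun c =>
        let seg := PySem.Chars.join [',', ' '] c ++ [',', ' ']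
        if 0 < limit ∧ (c.length : Int) = limit then seg ++ ['\n', ' ', ' '] else seg)).flatten := by
  induction hn : items.length using Nat.strong_induction_on generalizing items r with
  | _ n ih =>
  by_cases hl : limit ≤ 0
  · rw [pvFold_no_trigger limit items r 0 le_rfl (Or.inl hl)]
    rcases eq_or_ne items [] with rfl | hne
    · rw [pvChunksRec.eq_def]; simp [pvCat, hl]
    · rw [pvChunksRec.eq_def, if_pos hl, if_neg hne]
      simp only [List.map_cons, List.map_nil, List.flatten_cons, List.flatten_nil]
      rw [if_neg (by rintro ⟨h, -⟩; omega), pvCat_eq_join items hne]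
      simp
  · push_neg at hl
    by_cases hle : (items.length : Int) ≤ limit
    · rcases eq_or_ne items [] with rfl | hne
      · rw [pvChunksRec.eq_def, if_neg (by omega), dif_pos (by simp; omega), if_pos rfl]
        simp [pvCat]
      · rw [pvChunksRec.eq_def, if_neg (by omega), dif_pos hle, if_neg hne]
        simp only [List.map_cons, List.map_nil, List.flatten_cons, List.flatten_nil, List.append_nil]
        by_cases hfull : (items.length : Int) = limit
        · rw [pvFold_full limit hl items r hfull, if_pos ⟨hl, hfull⟩, pvCat_eq_join items hne]
          simp
        · rw [pvFold_no_trigger limit items r 0 le_rfl (by right; omega)]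
          rw [if_neg (by rintro ⟨-, h⟩; omega), pvCat_eq_join items hne]
    · push_neg at hle
      have h0 : 0 ≤ limit := le_of_lt hl
      rw [pvChunksRec.eq_def, if_neg (by omega), dif_neg (by omega)]
      have hlt : limit.toNat < items.length := by omega
      have hlen : ((items.take limit.toNat).length : Int) = limit := by
        simp [List.length_take]; omega
      conv_lhs => rw [← List.take_append_drop limit.toNat items, List.foldl_append]
      rw [pvFold_full limit hl _ r hlen]
      rw [ih (items.drop limit.toNat).length (by subst hn; simp; omega) _ _ rfl]
      simp only [List.map_cons, List.flatten_cons]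
      rw [if_pos ⟨hl, hlen⟩, pvCat_eq_join _ (by
        intro h; have := congrArg List.length h
        simp only [List.length_take, List.length_nil] at this; omega)]
      simp


-- the while-loop chunker agrees with the recursive characterisation
theorem pvChunksGo_eq_rec {α : Type} (limit : Int) (hl : 0 < limit) (items : List α)
    (i : Int) (hi : 0 ≤ i) :
    pvChunksGo limit hl items i = pvChunksRec limit (items.drop i.toNat) := by
  induction hm : ((items.length : Int) - i).toNat using Nat.strong_induction_on
    generalizing i with
  | _ m ih =>
  rw [pvChunksGo]
  by_cases h : i < (items.length : Int)
  · rw [dif_pos h]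
    have hslice : PySem.List.slice items (some i) (some (i + limit))
        = (items.drop i.toNat).take limit.toNat := by
      rw [PySem.List.slice_toNat items hi (by omega)]
      congr 1
      omega
    rw [hslice, ih ((items.length : Int) - (i + limit)).toNat (by omega) (i + limit) (by omega) rfl]
    have hdd : items.drop (i + limit).toNat = (items.drop i.toNat).drop limit.toNat := by
      rw [List.drop_drop]
      congr 1
      omega
    rw [hdd]
    set d := items.drop i.toNat with hd
    have hdne : d ≠ [] := by
      intro h0
      have := congrArg List.length h0
      simp [hd] at this
      omega
    have hnl : ¬ limit ≤ 0 := by omega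
    by_cases hfits : (d.length : Int) ≤ limit
    · have ht : d.take limit.toNat = d := List.take_of_length_le (by omega)
      have hz : d.drop limit.toNat = [] := List.drop_eq_nil_of_le (by omega)
      rw [ht, hz]
      conv_rhs => rw [pvChunksRec.eq_def, if_neg hnl, dif_pos hfits, if_neg hdne]
      rw [pvChunksRec.eq_def, if_neg hnl, dif_pos (by simp; omega), if_pos rfl]
    · conv_rhs => rw [pvChunksRec.eq_def, if_neg hnl, dif_neg hfits]
  · rw [dif_neg h]
    have hz : items.drop i.toNat = [] := List.drop_eq_nil_of_le (by omega)
    rw [hz, pvChunksRec.eq_def]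
    simp
    omega

-- B's chunker equals the recursive characterisation
theorem pvChunks_eq_rec {α : Type} (limit : Int) (items : List α) :
    pvChunks limit items = pvChunksRec limit items := by
  unfold pvChunks
  by_cases hl : limit ≤ 0
  · rw [dif_pos hl, pvChunksRec.eq_def, if_pos hl]
  · rw [dif_neg hl, pvChunksGo_eq_rec limit (by omega) items 0 le_rfl]
    simp

-- ===== VERDICT (by name: the statement is the Claim_ definition above) =====
theorem join_with_limit_spec : Claim_equal_join_with_limit := by
  intro arr limit _
  unfold Spec_join_with_limit join_with_limit join_with_limit_alt
  have hmap : arr.foldl (fun (st : List Char × Int) item =>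
      let result := st.1 ++ (PySem.Int.toStr item).toList ++ [',', ' ']
      let count := st.2 + 1
      if count = limit then (result ++ ['\n', ' ', ' '], 0) else (result, count)) ([], 0)
      = (arr.map (fun x => (PySem.Int.toStr x).toList)).foldl (pvStep limit) ([], 0) := by
    rw [List.foldl_map]
    rfl
  simp only [hmap]
  have := pvFold_eq_chunks limit (arr.map (fun x => (PySem.Int.toStr x).toList)) []
  simp only [List.nil_append] at this
  rw [this, pvChunks_eq_rec]
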